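-- pv_equiv track=rewrite | github.com/smw9552/NC-MFP | NC_MFP_Algorithm/Fingerprint_representation_step.py | get_all_NC_MFP_Label
-- ===== SOURCE A (Python) =====
-- from collections import OrderedDict
-- import itertools
--
-- def get_all_NC_MFP_Label(Final_all_NC_MFP_Info):
--
--     Final_all_NC_MFP_Label = []
--
--     Final_NC_MFP_BitString = list(itertools.chain(*Final_all_NC_MFP_Info))
--
--     for ai in range (0, len(Final_NC_MFP_BitString)):
--         Final_all_NC_MFP_Label.append(Final_NC_MFP_BitString[ai])
--
--     Final_all_NC_MFP_Label = list(OrderedDict.fromkeys(Final_all_NC_MFP_Label))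
--     Final_all_NC_MFP_Label.sort()
--
--     return Final_all_NC_MFP_Label
-- ===== SOURCE B (Python) =====
-- import itertools
--
-- def get_all_NC_MFP_Label(Final_all_NC_MFP_Info):
--     flat = sorted(itertools.chain.from_iterable(Final_all_NC_MFP_Info))
--     out = []
--     for x in flat:
--         if not out or out[-1] != x:
--             out.append(x)
--     return out
-- ===== Notes on version B (the rewrite author's own statement) =====
-- stated objective: alternative
-- what changed: Replaces A's index-loop copy plus OrderedDict.fromkeys hash dedup followed by a sort with a single sort of the flattened list followed by one linear pass that drops adjacent duplicates.
import Mathlib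
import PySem

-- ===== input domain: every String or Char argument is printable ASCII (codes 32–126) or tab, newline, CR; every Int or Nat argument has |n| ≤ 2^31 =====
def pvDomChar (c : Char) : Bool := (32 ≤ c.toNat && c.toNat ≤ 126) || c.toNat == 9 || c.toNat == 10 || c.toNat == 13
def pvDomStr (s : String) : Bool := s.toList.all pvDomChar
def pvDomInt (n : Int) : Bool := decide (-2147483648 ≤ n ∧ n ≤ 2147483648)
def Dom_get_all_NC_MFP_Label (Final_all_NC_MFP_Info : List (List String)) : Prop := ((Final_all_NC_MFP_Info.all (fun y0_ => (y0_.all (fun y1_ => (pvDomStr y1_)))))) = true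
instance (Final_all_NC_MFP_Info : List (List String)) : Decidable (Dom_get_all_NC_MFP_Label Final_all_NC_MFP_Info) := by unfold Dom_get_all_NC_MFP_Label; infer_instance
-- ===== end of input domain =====

-- B replaces A's hash-based dedup-then-sort by a single sort of the flattened list followed by
-- one linear pass removing adjacent duplicates (objective: alternative algorithm, same result).

-- ===== PORT A =====
-- literal port: flatten, index-loop appending each element, dict.fromkeys dedup, sort
def get_all_NC_MFP_Label (Final_all_NC_MFP_Info : List (List String)) : List String :=
  let finalNCMFPBitString := Final_all_NC_MFP_Info.flatten
  let finalLabels :=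
    (PySem.List.pyRange 0 (PySem.List.len finalNCMFPBitString) 1).foldl
      (fun acc ai => acc ++ [PySem.List.pyGetD finalNCMFPBitString ai ""]) []
  let finalLabels := PySem.List.dedup finalLabels
  PySem.List.sorted finalLabels (fun x => x) false

-- ===== PORT B =====
-- literal port of Source B: sort the flattened list once, then one pass keeping x only if it
-- differs from the previously kept element (out[-1] = getLast?)
def get_all_NC_MFP_Label_alt (Final_all_NC_MFP_Info : List (List String)) : List String :=
  let flat := PySem.List.sorted Final_all_NC_MFP_Info.flatten (fun x => x) false
  flat.foldl (fun out x => if out.isEmpty || out.getLast? != some x then out ++ [x] else out) []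

-- ===== PRECONDITION & SPEC =====
def Spec_get_all_NC_MFP_Label (Final_all_NC_MFP_Info : List (List String)) (out : List String) : Prop := out = get_all_NC_MFP_Label_alt Final_all_NC_MFP_Info
instance (Final_all_NC_MFP_Info : List (List String)) (out : List String) : Decidable (Spec_get_all_NC_MFP_Label Final_all_NC_MFP_Info out) := by unfold Spec_get_all_NC_MFP_Label; infer_instance

-- ===== CLAIM (what is proved, stated in full; the proofs are below) =====
def Claim_equal_get_all_NC_MFP_Label : Prop := ∀ (Final_all_NC_MFP_Info : List (List String)), Dom_get_all_NC_MFP_Label Final_all_NC_MFP_Info → Spec_get_all_NC_MFP_Label Final_all_NC_MFP_Info (get_all_NC_MFP_Label Final_all_NC_MFP_Info)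

-- ===== LEMMAS AND PROOFS =====

-- In a strictly increasing list every element is ≤ the last one
theorem pv_le_getLast_of_pairwise_lt (l : List String) (h : l.Pairwise (· < ·))
    (a z : String) (ha : a ∈ l) (hz : l.getLast? = some z) : a ≤ z := by
  have hne : l ≠ [] := by rintro rfl; simp at hz
  have hzl : l.getLast hne = z := by
    have := List.getLast?_eq_some_getLast (l := l) hne
    rw [this] at hz; exact Option.some.inj hz
  have hd : l.dropLast ++ [z] = l := hzl ▸ List.dropLast_concat_getLast hne
  rw [← hd] at h ha
  rw [List.pairwise_append] at h
  rcases List.mem_append.mp ha with ha | ha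
  · exact le_of_lt (h.2.2 a ha z (by simp))
  · simp at ha; exact le_of_eq ha

-- invariant for B's single pass: starting from a strictly increasing accumulator whose
-- elements are ≤ everything still to come, the fold stays strictly increasing and its
-- members are exactly acc ∪ s
theorem pv_adj_fold_invariant (s : List String) :
    ∀ acc : List String, acc.Pairwise (· < ·) → s.Pairwise (· ≤ ·) →
    (∀ a ∈ acc, ∀ b ∈ s, a ≤ b) →
    (s.foldl (fun out x => if out.isEmpty || out.getLast? != some x then out ++ [x] else out) acc).Pairwise (· < ·) ∧
    (∀ y, y ∈ s.foldl (fun out x => if out.isEmpty || out.getLast? != some x then out ++ [x] else out) acc ↔ y ∈ acc ∨ y ∈ s) := by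
  induction s with
  | nil => intro acc hA _ _; simpa using hA
  | cons x t ih =>
    intro acc hA hS hle
    rw [List.foldl_cons]
    by_cases hc : (acc.isEmpty || acc.getLast? != some x) = true
    · rw [if_pos hc]
      have hxlt : ∀ a ∈ acc, a < x := by
        intro a ha
        rcases hz : acc.getLast? with _ | z
        · exact absurd (List.getLast?_eq_none_iff.mp hz ▸ ha) (List.not_mem_nil)
        · have haz : a ≤ z := pv_le_getLast_of_pairwise_lt acc hA a z ha hz
          have hzx : z ≤ x := hle z (List.mem_of_getLast? hz) x (by simp)
          have hne : z ≠ x := by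
            rcases Bool.or_eq_true_iff.mp hc with he | hne
            · exact absurd (List.getLast?_eq_none_iff.mpr (List.isEmpty_iff.mp he) ▸ hz) (by simp)
            · intro h; rw [hz, h] at hne; simp at hne
          exact lt_of_le_of_lt haz (lt_of_le_of_ne hzx hne)
      have hA' : (acc ++ [x]).Pairwise (· < ·) := by
        rw [List.pairwise_append]
        exact ⟨hA, List.pairwise_singleton _ _, by intro a ha b hb; simp at hb; subst hb; exact hxlt a ha⟩
      have hle' : ∀ a ∈ acc ++ [x], ∀ b ∈ t, a ≤ b := by
        intro a ha b hb
        rcases List.mem_append.mp ha with ha | ha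
        · exact hle a ha b (by simp [hb])
        · simp at ha; subst ha; exact (List.pairwise_cons.mp hS).1 b hb
      obtain ⟨h1, h2⟩ := ih (acc ++ [x]) hA' (List.pairwise_cons.mp hS).2 hle'
      refine ⟨h1, fun y => ?_⟩
      rw [h2 y]; simp [or_assoc]
    · rw [if_neg hc]
      rw [Bool.not_eq_true] at hc
      have hx : x ∈ acc := by
        rcases hz : acc.getLast? with _ | z
        · simp [List.isEmpty_iff.mpr (List.getLast?_eq_none_iff.mp hz), hz] at hc
        · have : z = x := by by_contra hne; simp [hz, hne] at hc
          exact this ▸ List.mem_of_getLast? hz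
      have hle' : ∀ a ∈ acc, ∀ b ∈ t, a ≤ b := fun a ha b hb => hle a ha b (by simp [hb])
      obtain ⟨h1, h2⟩ := ih acc hA (List.pairwise_cons.mp hS).2 hle'
      refine ⟨h1, fun y => ?_⟩
      rw [h2 y]
      constructor
      · rintro (hy | hy)
        · exact Or.inl hy
        · exact Or.inr (List.mem_cons_of_mem _ hy)
      · rintro (hy | hy)
        · exact Or.inl hy
        · rcases List.mem_cons.mp hy with rfl | hy
          · exact Or.inl hx
          · exact Or.inr hy

theorem get_all_NC_MFP_Label_spec : Claim_equal_get_all_NC_MFP_Label := by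
  intro xs _
  unfold Spec_get_all_NC_MFP_Label get_all_NC_MFP_Label get_all_NC_MFP_Label_alt
  simp only [PySem.List.foldl_append_singleton_eq_map, List.nil_append,
    PySem.List.map_pyGetD_pyRange_zero]
  set flat := xs.flatten with hflat
  set r := (PySem.List.sorted flat (fun x => x) false).foldl
      (fun out x => if out.isEmpty || out.getLast? != some x then out ++ [x] else out) [] with hr
  obtain ⟨hpw, hmem⟩ := pv_adj_fold_invariant (PySem.List.sorted flat (fun x => x) false) []
    (List.Pairwise.nil) (PySem.List.sorted_pairwise flat (fun x => x)) (by simp)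
  have hmem' : ∀ y, y ∈ r ↔ y ∈ PySem.List.dedup flat := by
    intro y
    rw [hr, hmem y, PySem.List.mem_dedup, PySem.List.mem_sorted]
    simp
  have hperm : r.Perm (PySem.List.dedup flat) :=
    (List.perm_ext_iff_of_nodup (hpw.imp ne_of_lt) (PySem.List.nodup_dedup flat)).mpr hmem'
  exact PySem.List.sorted_eq_of_perm_of_pairwise_lt _ _ _ hperm hpw
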